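-- pv_equiv track=rewrite | github.com/Fortran-FOSS-Programmers/ford | ford/reader.py | _contains_unterminated_string
-- ===== SOURCE A (Python) =====
-- def _contains_unterminated_string(string: str) -> bool:
--     """Return True if `string` contains an unterminated quote"""
--     in_quote = False
--     current_quote = None
--     previous_char = None
--     for char in string:
--         # Non-quote characters don't bother us
--         if char not in ("'", '"'):
--             previous_char = char
--             continue
--         # Doubling-up a quote character doesn't make us leave a quote
--         if char == previous_char:
--             previous_char = char
--             continue
--         # If the current character is the same as the starting quote character
--         # then we have left the quote (as we've dealt with doubled-quotes)
--         if char == current_quote: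
--             in_quote = False
--             current_quote = None
--             previous_char = char
--             continue
--         # If we weren't in a quote before, we are now
--         if not in_quote:
--             current_quote = char
--             in_quote = True
--         previous_char = char
--     return in_quote
-- ===== SOURCE B (Python) =====
-- def _contains_unterminated_string(string: str) -> bool:
--     """Return True if `string` contains an unterminated quote"""
--     n = len(string)
--     i = 0
--     while i < n:
--         c = string[i]
--         if c in "'\"" and (i == 0 or string[i - 1] != c):
--             # c opens a quote: search directly for its matching closer, the
--             # next occurrence of c that is not doubling its predecessor
--             j = i + 1
--             while j < n and not (string[j] == c and string[j - 1] != c):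
--                 j += 1
--             if j == n:
--                 return True  # opener with no closer
--             i = j + 1
--         else:
--             i += 1
--     return False
-- ===== Notes on version B (the rewrite author's own statement) =====
-- stated objective: alternative
-- what changed: Replaces A's single-pass state machine over (in_quote, current_quote, previous_char) by a nested matched-pair scanner with no quote state: an outer loop that looks for the next opening quote and, for each opener found, an inner search that jumps directly to its matching closer (the next same quote not doubling its predecessor), returning True early when an opener has no closer.
import Mathlib
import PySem

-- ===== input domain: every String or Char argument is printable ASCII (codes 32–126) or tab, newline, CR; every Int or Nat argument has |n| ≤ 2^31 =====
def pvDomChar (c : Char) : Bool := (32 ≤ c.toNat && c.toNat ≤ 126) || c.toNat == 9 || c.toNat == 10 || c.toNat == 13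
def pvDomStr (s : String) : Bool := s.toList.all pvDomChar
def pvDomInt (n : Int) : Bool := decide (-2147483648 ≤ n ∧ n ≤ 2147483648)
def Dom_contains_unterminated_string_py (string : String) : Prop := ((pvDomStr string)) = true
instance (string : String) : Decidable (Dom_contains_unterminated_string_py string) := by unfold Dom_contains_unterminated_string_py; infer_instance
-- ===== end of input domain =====

-- B replaces A's single-pass three-variable state machine by a nested matched-pair scanner
-- (find an opener, then search directly for its matching closer, early return); alternative
-- decomposition, same cost.
-- ===== PORT A =====
-- Literal transliteration of A: one fold carrying (in_quote, current_quote, previous_char).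
def pvAStep : (Bool × Option Char × Option Char) → Char → (Bool × Option Char × Option Char)
  | (inq, cur, _prev), c =>
    if ¬ (c = '\'' ∨ c = '"') then (inq, cur, some c)
    else if some c = _prev then (inq, cur, some c)
    else if some c = cur then (false, none, some c)
    else if !inq then (true, some c, some c)
    else (inq, cur, some c)

def contains_unterminated_string_py (string : String) : Bool :=
  (string.toList.foldl pvAStep (false, none, none)).1

-- ===== PORT B =====
-- B's inner loop: given the opening quote q and the literal previous char p, scan for the
-- matching closer (the next q that is not doubling its predecessor); `some rest` = the
-- characters after the closer, `none` = no closer (the j == n case).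
def pvScanClose (q : Char) : Char → List Char → Option (List Char)
  | _, [] => none
  | p, c :: t => if c = q ∧ p ≠ q then some t else pvScanClose q c t

-- termination measure for the outer loop: the inner scan strictly consumes input
theorem pvScanClose_len (q : Char) : ∀ (p : Char) (l r : List Char),
    pvScanClose q p l = some r → r.length < l.length := by
  intro p l
  induction l generalizing p with
  | nil => intro r h; simp [pvScanClose] at h
  | cons c t ih =>
      intro r h
      simp only [pvScanClose] at h
      split_ifs at h with hc
      · cases h; simp
      · exact Nat.lt_trans (ih c r h) (Nat.lt_succ_self _)

-- B's outer loop: advance over the string (carrying the literal previous char, B's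
-- `string[i-1]`) until an opening quote; then hand over to pvScanClose and resume after
-- the closer, or return true if there is none.
def pvScanOpen : Option Char → List Char → Bool
  | _, [] => false
  | prev, c :: t =>
    if (c = '\'' ∨ c = '"') ∧ prev ≠ some c then
      match h : pvScanClose c c t with
      | none => true
      | some r => pvScanOpen (some c) r
    else pvScanOpen (some c) t
termination_by _ l => l.length
decreasing_by
  · exact Nat.lt_succ_of_lt (pvScanClose_len _ _ _ _ h)
  · simp

def contains_unterminated_string_py_alt (string : String) : Bool :=
  pvScanOpen none string.toList

-- ===== PRECONDITION & SPEC =====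
def Spec_contains_unterminated_string_py (string : String) (out : Bool) : Prop := out = contains_unterminated_string_py_alt string
instance (string : String) (out : Bool) : Decidable (Spec_contains_unterminated_string_py string out) := by unfold Spec_contains_unterminated_string_py; infer_instance

-- ===== CLAIM (what is proved, stated in full; the proofs are below) =====
def Claim_equal_contains_unterminated_string_py : Prop := ∀ (string : String), Dom_contains_unterminated_string_py string → Spec_contains_unterminated_string_py string (contains_unterminated_string_py string)

-- ===== LEMMAS AND PROOFS =====

-- Proof-only intermediate model: the subsequence of acting quotes, and a toggle over it.
def pvEffQuotes : Option Char → List Char → List Char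
  | _, [] => []
  | p, c :: t =>
    if (c = '\'' ∨ c = '"') ∧ p ≠ some c then c :: pvEffQuotes (some c) t
    else pvEffQuotes (some c) t

def pvToggle : Option Char → List Char → Option Char
  | cur, [] => cur
  | cur, c :: t =>
    if cur = none then pvToggle (some c) t
    else if some c = cur then pvToggle none t
    else pvToggle cur t

-- A's fold equals the toggle over the acting quotes.
theorem pvMainA (l : List Char) : ∀ (cur : Option Char) (p : Option Char),
    (l.foldl pvAStep (cur.isSome, cur, p)).1 = (pvToggle cur (pvEffQuotes p l)).isSome := by
  induction l with
  | nil => intro cur p; simp [pvEffQuotes, pvToggle]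
  | cons c t ih =>
    intro cur p
    have iN : (List.foldl pvAStep (false, none, some c) t).1
        = (pvToggle none (pvEffQuotes (some c) t)).isSome := by
      simpa using ih none (some c)
    have iS : (List.foldl pvAStep (true, some c, some c) t).1
        = (pvToggle (some c) (pvEffQuotes (some c) t)).isSome := by
      simpa using ih (some c) (some c)
    have iC : (List.foldl pvAStep (cur.isSome, cur, some c) t).1
        = (pvToggle cur (pvEffQuotes (some c) t)).isSome := ih cur (some c)
    simp only [List.foldl_cons, pvAStep, pvEffQuotes]
    split_ifs with h1 h2 h3 h4 <;>
      simp_all [pvToggle] <;>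
      cases cur <;> simp_all [pvToggle]

-- B's inner scan, seen through the toggle: while holding quote q, the toggle over the
-- acting quotes either stays at q forever (no closer) or restarts at none after the closer.
theorem pvMainClose (q : Char) (hq : q = '\'' ∨ q = '"') :
    ∀ (l : List Char) (p : Char),
      (pvScanClose q p l = none → pvToggle (some q) (pvEffQuotes (some p) l) = some q) ∧
      (∀ r, pvScanClose q p l = some r →
        pvToggle (some q) (pvEffQuotes (some p) l) = pvToggle none (pvEffQuotes (some q) r)) := by
  intro l
  induction l with
  | nil => intro p; simp [pvScanClose, pvEffQuotes, pvToggle]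
  | cons c t ih =>
    intro p
    constructor
    · intro h
      simp only [pvScanClose] at h
      split_ifs at h with hc
      · by_cases he : (c = '\'' ∨ c = '"') ∧ (some p : Option Char) ≠ some c
        · simp only [pvEffQuotes, if_pos he, pvToggle]
          have hne : some c ≠ some q := by
            intro hcq
            rcases he with ⟨_, hpc⟩
            rcases not_and_or.mp hc with h1 | h2
            · exact h1 (Option.some_injective _ hcq)
            · exact h2 (fun hpq => hpc (by rw [Option.some_inj]; rw [(Option.some_injective _ hcq), hpq]))
          simp [hne]
          exact (ih c).1 h
        · simp only [pvEffQuotes, if_neg he]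
          exact (ih c).1 h
    · intro r h
      simp only [pvScanClose] at h
      split_ifs at h with hc
      · -- c = q, p ≠ q: this is the closer
        rcases hc with ⟨hcq, hpq⟩
        cases h
        have he : (c = '\'' ∨ c = '"') ∧ (some p : Option Char) ≠ some c := by
          constructor
          · rw [hcq]; exact hq
          · simp [hcq]; exact hpq
        simp only [pvEffQuotes, if_pos he, pvToggle]
        simp [hcq]
      · -- not the closer
        by_cases he : (c = '\'' ∨ c = '"') ∧ (some p : Option Char) ≠ some c
        · have hne : some c ≠ some q := by
            intro hcq
            rcases he with ⟨_, hpc⟩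
            rcases not_and_or.mp hc with h1 | h2
            · exact h1 (Option.some_injective _ hcq)
            · exact h2 (fun hpq => hpc (by rw [Option.some_inj]; rw [(Option.some_injective _ hcq), hpq]))
          simp only [pvEffQuotes, if_pos he, pvToggle]
          simp [hne]
          exact (ih c).2 r h
        · simp only [pvEffQuotes, if_neg he]
          exact (ih c).2 r h

-- B's outer scan equals the toggle over the acting quotes.
theorem pvMainB (prev : Option Char) (l : List Char) :
    pvScanOpen prev l = (pvToggle none (pvEffQuotes prev l)).isSome := by
  induction prev, l using pvScanOpen.induct with
  | case1 prev => simp [pvScanOpen, pvEffQuotes, pvToggle]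
  | case2 prev c t hg h =>
    simp only [pvScanOpen, if_pos hg]
    simp only [pvEffQuotes, if_pos hg, pvToggle, reduceIte]
    have hcl := (pvMainClose c hg.1 t c).1 h
    split
    · simp [hcl]
    · next r heq => rw [h] at heq; cases heq
  | case3 prev c t hg r h ih =>
    simp only [pvScanOpen, if_pos hg]
    simp only [pvEffQuotes, if_pos hg, pvToggle, reduceIte]
    rw [(pvMainClose c hg.1 t c).2 r h]
    split
    · next heq => rw [h] at heq; cases heq
    · next r' heq =>
        rw [h] at heq
        cases heq
        exact ih
  | case4 prev c t hg ih =>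
    simp only [pvScanOpen, if_neg hg]
    simp only [pvEffQuotes, if_neg hg]
    exact ih

-- ===== VERDICT (by name: the statement is the Claim_ definition above) =====
theorem contains_unterminated_string_py_spec : Claim_equal_contains_unterminated_string_py := by
  intro s _
  show contains_unterminated_string_py s = contains_unterminated_string_py_alt s
  have hA := pvMainA s.toList none none
  have hB := pvMainB none s.toList
  simp only [contains_unterminated_string_py, contains_unterminated_string_py_alt]
  rw [hB]
  simpa using hA
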